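-- pv_equiv track=rewrite | github.com/FiresoftPH/Gacha_Planner | db/primocalc.py | worsecase
-- ===== SOURCE A (Python) =====
-- def worsecase(fivestars,guarantee):
--     primoneed = 0
--     while fivestars > 0:
--         if guarantee == True:
--             primoneed += 90*160
--             guarantee = False
--             fivestars -= 1
--         else:
--             primoneed += 90*160
--             guarantee = True
--     return primoneed
-- ===== SOURCE B (Python) =====
-- def worsecase(fivestars, guarantee):
--     if fivestars <= 0:
--         return 0
--     return 28800 * fivestars - (14400 if guarantee else 0)
-- ===== Notes on version B (the rewrite author's own statement) =====
-- stated objective: faster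
-- what changed: Replaces the per-pull simulation loop with a closed-form formula: each five-star costs two pity cycles (28800) except the first when guarantee is already set (14400).
import Mathlib
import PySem

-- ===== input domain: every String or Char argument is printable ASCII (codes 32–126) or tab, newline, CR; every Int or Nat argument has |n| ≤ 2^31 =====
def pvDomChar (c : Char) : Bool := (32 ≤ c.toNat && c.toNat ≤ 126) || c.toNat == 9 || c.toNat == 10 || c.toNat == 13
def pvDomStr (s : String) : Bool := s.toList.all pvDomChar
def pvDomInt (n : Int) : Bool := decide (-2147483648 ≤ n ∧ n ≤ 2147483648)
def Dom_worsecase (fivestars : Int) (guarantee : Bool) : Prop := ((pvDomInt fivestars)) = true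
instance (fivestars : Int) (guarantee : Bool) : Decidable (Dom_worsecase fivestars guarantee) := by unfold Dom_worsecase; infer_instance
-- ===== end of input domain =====

-- B replaces the per-pull simulation loop with a closed-form formula (objective: faster; measured asymptotic speed-up).
-- ===== PORT A =====
-- while-loop of A: transcribed as well-founded recursion on the state (fivestars, guarantee, primoneed)
def worsecaseLoop (fivestars : Int) (guarantee : Bool) (primoneed : Int) : Int :=
  if fivestars > 0 then
    if guarantee = true then
      worsecaseLoop (fivestars - 1) false (primoneed + 90*160)
    else
      worsecaseLoop fivestars true (primoneed + 90*160)
  else primoneed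
termination_by 2 * fivestars.toNat + (if guarantee then 0 else 1)
decreasing_by
  · have h2 : fivestars.toNat = (fivestars - 1).toNat + 1 := by omega
    split <;> omega
  · rename_i hg
    simp only [Bool.not_eq_true] at hg
    subst hg
    simp

def worsecase (fivestars : Int) (guarantee : Bool) : Int :=
  worsecaseLoop fivestars guarantee 0

-- ===== PORT B =====
-- B: closed form
def worsecase_alt (fivestars : Int) (guarantee : Bool) : Int :=
  if fivestars ≤ 0 then 0
  else 28800 * fivestars - (if guarantee then 14400 else 0)

-- ===== PRECONDITION & SPEC =====
def Spec_worsecase (fivestars : Int) (guarantee : Bool) (out : Int) : Prop := out = worsecase_alt fivestars guarantee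
instance (fivestars : Int) (guarantee : Bool) (out : Int) : Decidable (Spec_worsecase fivestars guarantee out) := by unfold Spec_worsecase; infer_instance

-- ===== CLAIM (what is proved, stated in full; the proofs are below) =====
def Claim_equal_worsecase : Prop := ∀ (fivestars : Int) (guarantee : Bool), Dom_worsecase fivestars guarantee → Spec_worsecase fivestars guarantee (worsecase fivestars guarantee)

-- ===== LEMMAS AND PROOFS =====
theorem worsecaseLoop_nonpos (f : Int) (g : Bool) (p : Int) (h : ¬ f > 0) :
    worsecaseLoop f g p = p := by
  rw [worsecaseLoop]; simp [h]

theorem worsecaseLoop_false (f : Int) (p : Int) (h : f > 0) :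
    worsecaseLoop f false p = worsecaseLoop f true (p + 14400) := by
  rw [worsecaseLoop]; simp [h]

theorem worsecaseLoop_true (n : Nat) (p : Int) :
    worsecaseLoop ((n : Int) + 1) true p = p + 14400 + 28800 * n := by
  induction n generalizing p with
  | zero =>
    rw [worsecaseLoop]
    rw [worsecaseLoop_nonpos _ _ _ (by norm_num)]
    norm_num
  | succ k ih =>
    rw [worsecaseLoop]
    have h1 : ((k + 1 : Nat) : Int) + 1 > 0 := by positivity
    rw [if_pos h1, if_pos rfl]
    have e : ((k + 1 : Nat) : Int) + 1 - 1 = (k : Int) + 1 := by push_cast; ring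
    rw [e, worsecaseLoop_false _ _ (by positivity), ih]
    push_cast; ring

-- ===== VERDICT (by name: the statement is the Claim_ definition above) =====
theorem worsecase_spec : Claim_equal_worsecase := by
  intro f g _
  unfold Spec_worsecase worsecase worsecase_alt
  by_cases hf : f ≤ 0
  · rw [worsecaseLoop_nonpos _ _ _ (by omega)]
    simp [hf]
  · have h0 : f > 0 := by omega
    obtain ⟨n, hn⟩ : ∃ n : Nat, f = (n : Int) + 1 := ⟨(f - 1).toNat, by omega⟩
    subst hn
    cases g with
    | false =>
      rw [worsecaseLoop_false _ _ h0, worsecaseLoop_true]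
      simp [hf]; ring
    | true =>
      rw [worsecaseLoop_true]
      simp [hf]; ring
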